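-- pv_equiv track=rewrite | github.com/RybakovaIE/BSUIR | lois/lab1.py | no_negotions
-- ===== SOURCE A (Python) =====
-- def no_negotions(line):
--     i = 0
--     while i < len(line):
--         if line[i] == '(':
--             if line[i+1:i+4] == '!A)':
--                 line = line[:i] + 'A' + line[i+4:]
--         i += 1
--     return line
-- ===== SOURCE B (Python) =====
-- def no_negotions(line):
--     return line.replace('(!A)', 'A')
-- ===== Notes on version B (the rewrite author's own statement) =====
-- stated objective: faster
-- what changed: Replaced the index-scanning loop that rebuilds the whole string by slicing on every match with a single call to str.replace, which performs the same non-overlapping left-to-right substitution in one linear pass.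
import Mathlib
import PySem

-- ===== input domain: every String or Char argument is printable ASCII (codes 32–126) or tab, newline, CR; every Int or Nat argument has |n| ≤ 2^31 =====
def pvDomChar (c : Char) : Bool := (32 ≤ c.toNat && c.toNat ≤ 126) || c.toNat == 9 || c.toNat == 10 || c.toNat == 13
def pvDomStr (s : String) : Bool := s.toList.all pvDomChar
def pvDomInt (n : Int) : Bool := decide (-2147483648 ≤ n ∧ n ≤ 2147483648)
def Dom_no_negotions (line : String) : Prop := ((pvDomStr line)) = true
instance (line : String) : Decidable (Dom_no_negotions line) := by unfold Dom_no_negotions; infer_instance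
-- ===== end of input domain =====

-- B replaces A's index-scanning loop (which rebuilds the whole string by slicing on every
-- match) with one str.replace call; same non-overlapping left-to-right substitution.


-- ===== PORT A =====
-- the while loop: i scans; on a match at i the string is rebuilt from slices and i still += 1
def noNegotionsGo (cs : List Char) (i : Nat) : List Char :=
  if h : i < cs.length then
    noNegotionsGo
      (if cs[i] = '(' then
        if PySem.List.slice cs (some ((i : Int) + 1)) (some ((i : Int) + 4)) = ['!', 'A', ')'] then
          PySem.List.slice cs none (some (i : Int)) ++ ['A'] ++
            PySem.List.slice cs (some ((i : Int) + 4)) none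
        else cs
      else cs) (i + 1)
  else cs
termination_by cs.length - i
decreasing_by
  split
  · split
    · rename_i hsl
      rw [PySem.List.slice_to_natCast,
          show (i : Int) + 4 = ((i + 4 : Nat) : Int) by push_cast; ring,
          PySem.List.slice_from_natCast]
      simp
      omega
    · omega
  · omega

def no_negotions (line : String) : String :=
  String.ofList (noNegotionsGo line.toList 0)

-- ===== PORT B =====
def no_negotions_alt (line : String) : String :=
  PySem.Str.replace line "(!A)" "A"

-- ===== PRECONDITION & SPEC =====
def Spec_no_negotions (line : String) (out : String) : Prop := out = no_negotions_alt line
instance (line : String) (out : String) : Decidable (Spec_no_negotions line out) := by unfold Spec_no_negotions; infer_instance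

-- ===== CLAIM (what is proved, stated in full; the proofs are below) =====
def Claim_equal_no_negotions : Prop := ∀ (line : String), Dom_no_negotions line → Spec_no_negotions line (no_negotions line)

-- ===== LEMMAS AND PROOFS =====

-- one-pass non-overlapping replacement of "(!A)" by 'A' — the normal form both proofs reach
def repNeg : List Char → List Char
  | [] => []
  | c :: t =>
    if ['(', '!', 'A', ')'].isPrefixOf (c :: t) then 'A' :: repNeg (t.drop 3)
    else c :: repNeg t
termination_by l => l.length
decreasing_by
  all_goals (simp; try omega)

theorem go_eq_repNeg (fuel : Nat) :
    ∀ (l acc : List Char), l.length ≤ fuel →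
      PySem.Chars.replace.go ['(', '!', 'A', ')'] ['A'] fuel l acc = acc.reverse ++ repNeg l := by
  induction fuel with
  | zero =>
      intro l acc h
      have hl : l = [] := List.eq_nil_of_length_eq_zero (by omega)
      subst hl
      simp [PySem.Chars.replace.go, repNeg.eq_1]
  | succ n ih =>
      intro l acc h
      cases l with
      | nil => simp [PySem.Chars.replace.go, repNeg.eq_1]
      | cons c t =>
          rw [PySem.Chars.replace.go]
          by_cases hp : ['(', '!', 'A', ')'].isPrefixOf (c :: t)
          · rw [if_pos hp, ih _ _ (by simp at h ⊢; omega), repNeg.eq_2, if_pos hp]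
            simp
          · rw [if_neg hp, ih _ _ (by simp at h ⊢; omega), repNeg.eq_2, if_neg hp]
            simp

theorem replace_eq_repNeg (l : List Char) :
    PySem.Chars.replace l ['(', '!', 'A', ')'] ['A'] = repNeg l := by
  rw [PySem.Chars.replace]
  simp [go_eq_repNeg l.length l [] (le_refl _)]

-- the condition A tests at i is exactly "(!A)" being a prefix of the rest of the string
theorem cond_iff_prefix (cs : List Char) (i : Nat) (h : i < cs.length) :
    (cs[i] = '(' ∧ (cs.drop (i + 1)).take 3 = ['!', 'A', ')']) ↔
      ['(', '!', 'A', ')'].isPrefixOf (cs.drop i) := by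
  have hd : cs.drop i = cs[i] :: cs.drop (i + 1) := List.drop_eq_getElem_cons h
  rw [List.isPrefixOf_iff_prefix, hd, List.prefix_iff_eq_take,
      show ['(', '!', 'A', ')'].length = 3 + 1 from rfl, List.take_succ_cons]
  constructor
  · rintro ⟨h1, h2⟩
    rw [h1, h2]
  · intro h2
    simp only [List.cons.injEq] at h2
    exact ⟨h2.1.symm, h2.2.symm⟩

theorem repNeg_pos (cs : List Char) (i : Nat) (h : i < cs.length)
    (hp : ['(', '!', 'A', ')'].isPrefixOf (cs.drop i)) :
    repNeg (cs.drop i) = 'A' :: repNeg (cs.drop (i + 4)) := by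
  rw [List.drop_eq_getElem_cons h] at hp ⊢
  rw [repNeg.eq_2, if_pos hp, List.drop_drop, show i + 1 + 3 = i + 4 from by omega]

theorem repNeg_neg (cs : List Char) (i : Nat) (h : i < cs.length)
    (hp : ¬ ['(', '!', 'A', ')'].isPrefixOf (cs.drop i)) :
    repNeg (cs.drop i) = cs[i] :: repNeg (cs.drop (i + 1)) := by
  rw [List.drop_eq_getElem_cons h] at hp ⊢
  rw [repNeg.eq_2, if_neg hp]

theorem go_eq (n : Nat) : ∀ (cs : List Char) (i : Nat), cs.length - i ≤ n → i ≤ cs.length →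
    noNegotionsGo cs i = cs.take i ++ repNeg (cs.drop i) := by
  induction n with
  | zero =>
      intro cs i hn hi
      rw [noNegotionsGo.eq_def, dif_neg (by omega)]
      have hie : i = cs.length := by omega
      subst hie
      simp [repNeg.eq_1]
  | succ n ih =>
      intro cs i hn hi
      by_cases h : i < cs.length
      · rw [noNegotionsGo.eq_def, dif_pos h]
        split_ifs with h1 h2
        · -- match: string rebuilt, scan continues right after the inserted 'A'
          have hc2 : (cs.drop (i + 1)).take 3 = ['!', 'A', ')'] := by
            rw [show (i : Int) + 4 = ((i + 1 : Nat) : Int) + ((3 : Nat) : Int) by push_cast; ring,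
                show (i : Int) + 1 = ((i + 1 : Nat) : Int) by push_cast; ring,
                PySem.List.slice_natCast_add] at h2
            exact h2
          have hp := (cond_iff_prefix cs i h).mp ⟨h1, hc2⟩
          have h4 : i + 4 ≤ cs.length := by
            have := congrArg List.length hc2
            simp at this
            omega
          rw [PySem.List.slice_to_natCast,
              show (i : Int) + 4 = ((i + 4 : Nat) : Int) by push_cast; ring,
              PySem.List.slice_from_natCast]
          set cs' := cs.take i ++ ['A'] ++ cs.drop (i + 4) with hcs'
          have hlenAB : (cs.take i ++ ['A']).length = i + 1 := by simp; omega
          have hlen' : cs'.length = i + 1 + (cs.length - (i + 4)) := by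
            simp [hcs']; omega
          rw [ih cs' (i + 1) (by omega) (by omega)]
          have ht : cs'.take (i + 1) = cs.take i ++ ['A'] := by
            rw [hcs', ← hlenAB, List.take_left]
          have hdr : cs'.drop (i + 1) = cs.drop (i + 4) := by
            rw [hcs', ← hlenAB, List.drop_left]
          rw [ht, hdr, repNeg_pos cs i h hp]
          simp
        · -- '(' at i but the next three chars are not "!A)": nothing changes
          have hp : ¬ ['(', '!', 'A', ')'].isPrefixOf (cs.drop i) := by
            intro hpp
            rcases (cond_iff_prefix cs i h).mpr hpp with ⟨_, hc2⟩
            apply h2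
            rw [show (i : Int) + 4 = ((i + 1 : Nat) : Int) + ((3 : Nat) : Int) by push_cast; ring,
                show (i : Int) + 1 = ((i + 1 : Nat) : Int) by push_cast; ring,
                PySem.List.slice_natCast_add]
            exact hc2
          rw [ih cs (i + 1) (by omega) (by omega), repNeg_neg cs i h hp]
          rw [List.take_add_one, List.getElem?_eq_getElem h, Option.toList_some,
              List.append_assoc, List.singleton_append]
        · -- no '(' at i: nothing changes
          have hp : ¬ ['(', '!', 'A', ')'].isPrefixOf (cs.drop i) := by
            intro hpp
            exact h1 ((cond_iff_prefix cs i h).mpr hpp).1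
          rw [ih cs (i + 1) (by omega) (by omega), repNeg_neg cs i h hp]
          rw [List.take_add_one, List.getElem?_eq_getElem h, Option.toList_some,
              List.append_assoc, List.singleton_append]
      · rw [noNegotionsGo.eq_def, dif_neg h]
        have hie : i = cs.length := by omega
        subst hie
        simp [repNeg.eq_1]

-- ===== VERDICT (by name: the statement is the Claim_ definition above) =====
theorem no_negotions_spec : Claim_equal_no_negotions := by
  intro line _
  unfold Spec_no_negotions no_negotions no_negotions_alt
  have h1 : noNegotionsGo line.toList 0 = repNeg line.toList := by
    simpa using go_eq line.toList.length line.toList 0 (by omega) (by omega)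
  have h2 : (PySem.Str.replace line "(!A)" "A").toList = repNeg line.toList := by
    rw [PySem.Str.toList_replace]
    exact replace_eq_repNeg line.toList
  rw [h1, ← h2]
  exact String.ofList_toList
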